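-- pv_equiv track=rewrite | github.com/NoahQue/KeywordAnalysis | task1/keyword_recognition.py | switch_case_count
-- ===== SOURCE A (Python) =====
-- def switch_case_count(key_data):
--     case_num = []
--     switch_num = 0
--     temp_case = 0
--     for value in key_data:
--         if value == "switch":
--             switch_num += 1
--             if temp_case > 0:
--                 case_num.append(temp_case)
--                 temp_case = 0
--         if value == "case":
--             temp_case += 1
--     case_num.append(temp_case)
--
--     return switch_num, case_num
-- ===== SOURCE B (Python) =====
-- def switch_case_count(key_data):
--     # Index-based segmentation: locate every "switch", then count "case" in
--     # each slice between consecutive switch positions.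
--     bounds = [i for i, v in enumerate(key_data) if v == "switch"]
--     starts = [0] + [i + 1 for i in bounds]
--     stops = bounds + [len(key_data)]
--     counts = [key_data[a:b].count("case") for a, b in zip(starts, stops)]
--     *init, last = counts
--     return len(bounds), [c for c in init if c > 0] + [last]
-- ===== Notes on version B (the rewrite author's own statement) =====
-- stated objective: alternative
-- what changed: B replaces A's single accumulator scan by index-based segmentation: it collects the positions of every "switch" via enumerate, builds the (start, stop) slice boundaries, counts "case" inside each slice, and assembles the result from that counts list (dropping zero intermediate counts, keeping the last).
import Mathlib
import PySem

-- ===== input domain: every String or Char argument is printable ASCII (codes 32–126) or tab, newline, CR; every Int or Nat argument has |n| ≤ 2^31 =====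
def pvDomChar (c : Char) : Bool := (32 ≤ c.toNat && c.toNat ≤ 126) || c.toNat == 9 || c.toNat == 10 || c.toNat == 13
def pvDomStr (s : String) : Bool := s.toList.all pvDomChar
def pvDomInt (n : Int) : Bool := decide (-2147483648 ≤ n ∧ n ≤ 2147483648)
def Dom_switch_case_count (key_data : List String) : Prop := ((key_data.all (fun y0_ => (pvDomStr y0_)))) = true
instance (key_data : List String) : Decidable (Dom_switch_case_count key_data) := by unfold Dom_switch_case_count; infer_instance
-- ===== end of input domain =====

-- B: alternative decomposition — find the "switch" positions, then count "case" in each slice between consecutive switches; same O(n) order of cost.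


-- ===== PORT A =====
def switch_case_count (key_data : List String) : Int × List Int :=
  let s := key_data.foldl (fun (st : List Int × Int × Int) value =>
    let case_num := st.1
    let switch_num := st.2.1
    let temp_case := st.2.2
    let st1 : List Int × Int × Int :=
      if value == "switch" then
        (if temp_case > 0 then case_num ++ [temp_case] else case_num,
         switch_num + 1,
         if temp_case > 0 then 0 else temp_case)
      else (case_num, switch_num, temp_case)
    if value == "case" then (st1.1, st1.2.1, st1.2.2 + 1) else st1) ([], 0, 0)
  (s.2.1, s.1 ++ [s.2.2])

-- ===== PORT B =====
def switch_case_count_alt (key_data : List String) : Int × List Int :=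
  let bounds := ((PySem.List.enumerate key_data 0).filter (fun p => p.2 == "switch")).map (fun p => p.1)
  let starts := (0 : Int) :: bounds.map (· + 1)
  let stops := bounds ++ [(key_data.length : Int)]
  let counts := (starts.zip stops).map
    (fun p => (PySem.List.count (PySem.List.slice key_data (some p.1) (some p.2)) "case" : Int))
  ((bounds.length : Int),
   counts.dropLast.filter (fun c => c > 0) ++ [counts.getLastD 0])

-- ===== PRECONDITION & SPEC =====
def Spec_switch_case_count (key_data : List String) (out : Int × List Int) : Prop := out = switch_case_count_alt key_data
instance (key_data : List String) (out : Int × List Int) : Decidable (Spec_switch_case_count key_data out) := by unfold Spec_switch_case_count; infer_instance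

-- ===== CLAIM (what is proved, stated in full; the proofs are below) =====
def Claim_equal_switch_case_count : Prop := ∀ (key_data : List String), Dom_switch_case_count key_data → Spec_switch_case_count key_data (switch_case_count key_data)

-- ===== LEMMAS AND PROOFS =====

-- Canonical per-switch segment counts: segs xs lists, front to back, how many
-- "case" occur in each region delimited by the "switch" occurrences (always nonempty).
def segs : List String → List Int
  | [] => [0]
  | v :: xs =>
    if v = "switch" then 0 :: segs xs
    else if v = "case" then ((segs xs).headD 0 + 1) :: (segs xs).tail
    else segs xs

theorem segs_cons (v : String) (xs : List String) :
    segs (v :: xs) =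
      if v = "switch" then 0 :: segs xs
      else if v = "case" then ((segs xs).headD 0 + 1) :: (segs xs).tail
      else segs xs := rfl

theorem segs_ne_nil (xs : List String) : segs xs ≠ [] := by
  induction xs with
  | nil => simp [segs]
  | cons v xs ih => rw [segs_cons]; split_ifs <;> simp_all

theorem headD_cons_tail (l : List Int) (h : l ≠ []) : l.headD 0 :: l.tail = l := by
  rcases l with _ | ⟨a, t⟩
  · exact absurd rfl h
  · rfl

theorem getLastD_of_ne_nil (l : List Int) (d d' : Int) (h : l ≠ []) :
    l.getLastD d = l.getLastD d' := by
  rw [List.getLastD_eq_getLast?, List.getLastD_eq_getLast?]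
  rcases List.getLast?_isSome.mpr h with hs
  obtain ⟨a, ha⟩ := Option.isSome_iff_exists.mp hs
  simp [ha]

-- the list of "switch" positions, as B's port computes it
def bnds (xs : List String) : List Int :=
  ((PySem.List.enumerate xs 0).filter (fun p => p.2 == "switch")).map (fun p => p.1)

-- the case count of a slice, as B's port computes it
def cnt (xs : List String) (p : Int × Int) : Int :=
  (PySem.List.count (PySem.List.slice xs (some p.1) (some p.2)) "case" : Int)

-- the counts list of B's port, as a function
def countsOf (xs : List String) : List Int :=
  (((0 : Int) :: (bnds xs).map (· + 1)).zip ((bnds xs) ++ [(xs.length : Int)])).map (cnt xs)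

theorem enumerate_shift {α : Type} (xs : List α) (s : Int) :
    PySem.List.enumerate xs (s + 1) = (PySem.List.enumerate xs s).map (fun p => (p.1 + 1, p.2)) := by
  induction xs generalizing s with
  | nil => simp [PySem.List.enumerate_nil]
  | cons x xs ih =>
    rw [PySem.List.enumerate_cons, PySem.List.enumerate_cons, List.map_cons, ← ih]

theorem bnds_cons (v : String) (xs : List String) :
    bnds (v :: xs) = (if v = "switch" then [0] else []) ++ (bnds xs).map (· + 1) := by
  unfold bnds
  rw [PySem.List.enumerate_cons, show (0:Int) + 1 = 0 + 1 by rfl, enumerate_shift]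
  simp only [List.filter_cons]
  by_cases h : v = "switch" <;>
    simp [h, List.filter_map, List.map_map, Function.comp_def]

theorem bnds_nonneg (xs : List String) : ∀ i ∈ bnds xs, 0 ≤ i := by
  induction xs with
  | nil => simp [bnds, PySem.List.enumerate_nil]
  | cons v xs ih =>
    intro i hi
    rw [bnds_cons] at hi
    rcases List.mem_append.mp hi with h | h
    · split_ifs at h <;> simp_all
    · obtain ⟨j, hj, rfl⟩ := List.mem_map.mp h
      have := ih j hj; omega

theorem slice_cons_shift (v : String) (xs : List String) (a b : Int) (ha : 0 ≤ a) (hb : 0 ≤ b) :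
    PySem.List.slice (v :: xs) (some (a + 1)) (some (b + 1)) = PySem.List.slice xs (some a) (some b) := by
  rw [PySem.List.slice_toNat _ (by omega) (by omega), PySem.List.slice_toNat _ ha hb]
  have h1 : (a + 1).toNat = a.toNat + 1 := by omega
  have h2 : (b + 1).toNat = b.toNat + 1 := by omega
  simp [h1, h2]

theorem slice_cons_zero (v : String) (xs : List String) (b : Int) (hb : 0 ≤ b) :
    PySem.List.slice (v :: xs) (some 0) (some (b + 1)) = v :: PySem.List.slice xs (some 0) (some b) := by
  rw [PySem.List.slice_toNat _ le_rfl (by omega), PySem.List.slice_toNat _ le_rfl hb]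
  have h2 : (b + 1).toNat = b.toNat + 1 := by omega
  simp [h2]

theorem cnt_cons_zero (v : String) (xs : List String) (b : Int) (hb : 0 ≤ b) :
    cnt (v :: xs) (0, b + 1) = cnt xs (0, b) + (if v = "case" then 1 else 0) := by
  unfold cnt
  rw [slice_cons_zero v xs b hb]
  rw [PySem.List.count_eq, PySem.List.count_eq, List.count_cons]
  by_cases h : v = "case" <;> simp [h]

theorem counts_shift (v : String) (xs : List String) (s t : List Int)
    (hs : ∀ a ∈ s, 0 ≤ a) (ht : ∀ b ∈ t, 0 ≤ b) :
    ((s.map (· + 1)).zip (t.map (· + 1))).map (cnt (v :: xs)) = (s.zip t).map (cnt xs) := by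
  rw [List.zip_map, List.map_map]
  apply List.map_congr_left
  intro p hp
  obtain ⟨h1, h2⟩ := List.of_mem_zip hp
  show cnt (v :: xs) (Prod.map _ _ p) = cnt xs p
  unfold cnt
  simp only [Prod.map]
  rw [slice_cons_shift v xs p.1 p.2 (hs _ h1) (ht _ h2)]

theorem mem_append_last_nonneg (xs : List String) :
    ∀ b ∈ bnds xs ++ [(xs.length : Int)], 0 ≤ b := by
  intro b hb
  rcases List.mem_append.mp hb with h | h
  · exact bnds_nonneg xs b h
  · simp at h; omega

theorem countsOf_cons (v : String) (xs : List String) :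
    countsOf (v :: xs) =
      if v = "switch" then 0 :: countsOf xs
      else ((countsOf xs).headD 0 + (if v = "case" then 1 else 0)) :: (countsOf xs).tail := by
  unfold countsOf
  rw [bnds_cons]
  have hlen : ((v :: xs).length : Int) = (xs.length : Int) + 1 := by push_cast [List.length_cons]; ring
  by_cases h : v = "switch"
  · subst h
    simp only [if_true, List.nil_append, List.map_cons, List.cons_append,
      List.zip_cons_cons, hlen]
    refine List.cons_eq_cons.mpr ⟨?_, ?_⟩
    · show cnt ("switch" :: xs) (0, 0) = 0
      unfold cnt
      rw [PySem.List.slice_toNat _ le_rfl le_rfl]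
      simp [PySem.List.count_eq]
    · rw [show ((0:Int) + 1) :: List.map (fun x => x + 1) (List.map (fun x => x + 1) (bnds xs))
            = ((0 : Int) :: List.map (fun x => x + 1) (bnds xs)).map (fun x => x + 1) from rfl,
          show List.map (fun x => (x : Int) + 1) (bnds xs) ++ [(xs.length : Int) + 1]
            = ((bnds xs) ++ [(xs.length : Int)]).map (fun x => x + 1) by simp]
      apply counts_shift
      · intro a ha
        rcases List.mem_cons.mp ha with rfl | ha'
        · omega
        · obtain ⟨j, hj, rfl⟩ := List.mem_map.mp ha'
          have := bnds_nonneg xs j hj; omega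
      · exact mem_append_last_nonneg xs
  · simp only [h, if_false, List.nil_append, hlen]
    rcases hB : bnds xs with _ | ⟨b0, B'⟩
    · simp only [List.map_nil, List.nil_append, List.zip_cons_cons, List.map_cons,
        List.zip_nil_left, List.headD_cons, List.tail_cons]
      refine List.cons_eq_cons.mpr ⟨?_, rfl⟩
      exact cnt_cons_zero v xs _ (by omega)
    · have hb0 : 0 ≤ b0 := bnds_nonneg xs b0 (by rw [hB]; exact List.mem_cons_self ..)
      simp only [List.map_cons, List.cons_append, List.zip_cons_cons,
        List.headD_cons, List.tail_cons]
      refine List.cons_eq_cons.mpr ⟨?_, ?_⟩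
      · exact cnt_cons_zero v xs b0 hb0
      · rw [show ((b0 + 1 + 1) :: List.map (fun x => x + 1) (List.map (fun x => x + 1) B'))
              = (((b0 + 1) :: List.map (fun x => x + 1) B').map (fun x => x + 1)) from rfl,
            show (List.map (fun x => (x : Int) + 1) B' ++ [(xs.length : Int) + 1])
              = ((B' ++ [(xs.length : Int)]).map (fun x => x + 1)) by simp]
        apply counts_shift
        · intro a ha
          rcases List.mem_cons.mp ha with rfl | ha'
          · omega
          · obtain ⟨j, hj, rfl⟩ := List.mem_map.mp ha'
            have : j ∈ bnds xs := by rw [hB]; exact List.mem_cons_of_mem _ hj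
            have := bnds_nonneg xs j this; omega
        · intro b hb
          have : b ∈ bnds xs ++ [(xs.length : Int)] := by
            rw [hB]
            rcases List.mem_append.mp hb with h' | h'
            · exact List.mem_append.mpr (Or.inl (List.mem_cons_of_mem _ h'))
            · exact List.mem_append.mpr (Or.inr h')
          exact mem_append_last_nonneg xs b this

theorem countsOf_eq_segs (xs : List String) : countsOf xs = segs xs := by
  induction xs with
  | nil => decide
  | cons v xs ih =>
    rw [countsOf_cons, ih, segs_cons]
    split_ifs with h1 h2
    · rfl
    · rfl
    · rw [add_zero, headD_cons_tail _ (segs_ne_nil xs)]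

theorem bnds_length (xs : List String) : (bnds xs).length + 1 = (segs xs).length := by
  have h := congrArg List.length (countsOf_eq_segs xs)
  unfold countsOf at h
  rw [List.length_map, List.length_zip] at h
  simp at h
  omega

-- the list A has appended when the scan state is (·, ·, t) and the rest of the input is xs
def bodyA (t : Int) : List String → List Int
  | [] => []
  | v :: xs =>
    if v = "switch" then (if t > 0 then [t] else []) ++ bodyA (if t > 0 then 0 else t) xs
    else if v = "case" then bodyA (t + 1) xs
    else bodyA t xs

-- the final pending-case counter when the scan state is (·, ·, t) and the rest of the input is xs
def finA (t : Int) : List String → Int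
  | [] => t
  | v :: xs =>
    if v = "switch" then finA (if t > 0 then 0 else t) xs
    else if v = "case" then finA (t + 1) xs
    else finA t xs

theorem foldA (xs : List String) : ∀ (cn : List Int) (sn t : Int),
    xs.foldl (fun (st : List Int × Int × Int) value =>
      let case_num := st.1
      let switch_num := st.2.1
      let temp_case := st.2.2
      let st1 : List Int × Int × Int :=
        if value == "switch" then
          (if temp_case > 0 then case_num ++ [temp_case] else case_num,
           switch_num + 1,
           if temp_case > 0 then 0 else temp_case)
        else (case_num, switch_num, temp_case)
      if value == "case" then (st1.1, st1.2.1, st1.2.2 + 1) else st1) (cn, sn, t)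
    = (cn ++ bodyA t xs, sn + (xs.count "switch" : Int), finA t xs) := by
  induction xs with
  | nil =>
    intro cn sn t
    simp [bodyA, finA]
  | cons v xs ih =>
    intro cn sn t
    rw [List.foldl_cons]
    by_cases hsw : v = "switch"
    · subst hsw
      have H := ih (cn ++ (if t > 0 then [t] else [])) (sn + 1) (if t > 0 then 0 else t)
      by_cases hp : t > 0 <;>
        simpa [hp, bodyA, finA, List.count_cons, List.append_assoc, add_assoc, add_comm,
          add_left_comm] using H
    · by_cases hc : v = "case"
      · subst hc
        have H := ih cn sn (t + 1)
        simpa [bodyA, finA, List.count_cons] using H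
      · have H := ih cn sn t
        simpa [hsw, hc, bodyA, finA, List.count_cons, beq_false_of_ne hsw,
          beq_false_of_ne hc] using H

theorem segs_tail_len (xs : List String) : (segs xs).tail.length + 1 = (segs xs).length := by
  conv_rhs => rw [← headD_cons_tail _ (segs_ne_nil xs)]
  simp

theorem count_switch_eq (xs : List String) :
    (xs.count "switch" : Int) = ((segs xs).length : Int) - 1 := by
  induction xs with
  | nil => simp [segs]
  | cons v xs ih =>
    have h2 := segs_tail_len xs
    rw [List.count_cons, segs_cons]
    by_cases hsw : v = "switch"
    · rw [if_pos (by simpa using hsw), if_pos hsw, List.length_cons]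
      push_cast
      omega
    · rw [if_neg (by simpa using hsw), if_neg hsw]
      by_cases hc : v = "case"
      · rw [if_pos hc, List.length_cons]
        push_cast
        omega
      · rw [if_neg hc]
        push_cast
        omega

theorem bodyA_eq (xs : List String) : ∀ t : Int, 0 ≤ t →
    bodyA t xs = (((t + (segs xs).headD 0) :: (segs xs).tail).dropLast).filter (fun c => c > 0) := by
  induction xs with
  | nil =>
    intro t ht
    simp [bodyA, segs]
  | cons v xs ih =>
    intro t ht
    rw [segs_cons]
    by_cases hsw : v = "switch"
    · rw [bodyA, if_pos hsw, if_pos hsw]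
      have h0 : (if t > 0 then (0 : Int) else t) = 0 := by split_ifs <;> omega
      rw [h0, ih 0 le_rfl, List.headD_cons, List.tail_cons, add_zero, zero_add,
          headD_cons_tail _ (segs_ne_nil xs),
          List.dropLast_cons_of_ne_nil (segs_ne_nil xs), List.filter_cons]
      by_cases hp : t > 0
      · rw [if_pos hp, if_pos (by simpa using hp)]
        rfl
      · rw [if_neg hp, if_neg (by simpa using hp)]
        rfl
    · by_cases hc : v = "case"
      · rw [bodyA, if_neg hsw, if_pos hc, if_neg hsw, if_pos hc, ih (t + 1) (by omega),
            List.headD_cons, List.tail_cons]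
        rw [show t + ((segs xs).headD 0 + 1) = t + 1 + (segs xs).headD 0 by ring]
      · rw [bodyA, if_neg hsw, if_neg hc, if_neg hsw, if_neg hc, ih t ht]

theorem finA_eq (xs : List String) : ∀ t : Int, 0 ≤ t →
    finA t xs = ((t + (segs xs).headD 0) :: (segs xs).tail).getLastD 0 := by
  induction xs with
  | nil =>
    intro t ht
    simp [finA, segs]
  | cons v xs ih =>
    intro t ht
    rw [segs_cons]
    by_cases hsw : v = "switch"
    · rw [finA, if_pos hsw, if_pos hsw]
      have h0 : (if t > 0 then (0 : Int) else t) = 0 := by split_ifs <;> omega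
      rw [h0, ih 0 le_rfl, List.headD_cons, List.tail_cons, add_zero, zero_add,
          headD_cons_tail _ (segs_ne_nil xs), List.getLastD_cons,
          getLastD_of_ne_nil _ t 0 (segs_ne_nil xs)]
    · by_cases hc : v = "case"
      · rw [finA, if_neg hsw, if_pos hc, if_neg hsw, if_pos hc, ih (t + 1) (by omega),
            List.headD_cons, List.tail_cons]
        rw [show t + ((segs xs).headD 0 + 1) = t + 1 + (segs xs).headD 0 by ring]
      · rw [finA, if_neg hsw, if_neg hc, if_neg hsw, if_neg hc, ih t ht]

-- ===== VERDICT (by name: the statement is the Claim_ definition above) =====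
theorem switch_case_count_spec : Claim_equal_switch_case_count := by
  intro key_data _
  show switch_case_count key_data = switch_case_count_alt key_data
  unfold switch_case_count switch_case_count_alt
  have hfold := foldA key_data [] 0 0
  simp only [hfold, List.nil_append]
  have hc : (((0 : Int) :: ((((PySem.List.enumerate key_data 0).filter (fun p => p.2 == "switch")).map (fun p => p.1)).map (fun x => x + 1))).zip
      ((((PySem.List.enumerate key_data 0).filter (fun p => p.2 == "switch")).map (fun p => p.1)) ++ [(key_data.length : Int)])).map
      (fun p => (PySem.List.count (PySem.List.slice key_data (some p.1) (some p.2)) "case" : Int))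
      = countsOf key_data := rfl
  have hb : ((((PySem.List.enumerate key_data 0).filter (fun p => p.2 == "switch")).map (fun p => p.1)).length : Int)
      = ((segs key_data).length : Int) - 1 := by
    have := bnds_length key_data
    unfold bnds at this
    omega
  rw [bodyA_eq key_data 0 le_rfl, finA_eq key_data 0 le_rfl, count_switch_eq,
      zero_add, zero_add, headD_cons_tail _ (segs_ne_nil key_data), hc, countsOf_eq_segs]
  rw [hb]
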